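-- pv_equiv track=rewrite | github.com/Shiyuan-Huang-23/acsl-programs | AllStars/Tomography.py | check
-- ===== SOURCE A (Python) =====
-- def check(arr, rowSum, colSum):
--     for i in range(len(arr)):
--         if sum(arr[i]) != int(rowSum[i]):
--             return False
--     for i in range(len(arr[0])):
--         s = 0
--         for j in range(len(arr)):
--             s += arr[j][i]
--         if s != int(colSum[i]):
--             return False
--     return True
-- ===== SOURCE B (Python) =====
-- def check(arr, rowSum, colSum):
--     width = len(arr[0])
--     cols = [0] * width
--     for i in range(len(arr)):
--         if sum(arr[i]) != int(rowSum[i]):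
--             return False
--         for j, v in enumerate(arr[i][:width]):
--             cols[j] += v
--     for i in range(width):
--         if cols[i] != int(colSum[i]):
--             return False
--     return True
-- ===== Notes on version B (the rewrite author's own statement) =====
-- stated objective: alternative
-- what changed: B accumulates all column sums in running accumulators during the single row pass (over each row's first len(arr[0]) entries), replacing A's second nested per-column rescan of the whole matrix.
import Mathlib
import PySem

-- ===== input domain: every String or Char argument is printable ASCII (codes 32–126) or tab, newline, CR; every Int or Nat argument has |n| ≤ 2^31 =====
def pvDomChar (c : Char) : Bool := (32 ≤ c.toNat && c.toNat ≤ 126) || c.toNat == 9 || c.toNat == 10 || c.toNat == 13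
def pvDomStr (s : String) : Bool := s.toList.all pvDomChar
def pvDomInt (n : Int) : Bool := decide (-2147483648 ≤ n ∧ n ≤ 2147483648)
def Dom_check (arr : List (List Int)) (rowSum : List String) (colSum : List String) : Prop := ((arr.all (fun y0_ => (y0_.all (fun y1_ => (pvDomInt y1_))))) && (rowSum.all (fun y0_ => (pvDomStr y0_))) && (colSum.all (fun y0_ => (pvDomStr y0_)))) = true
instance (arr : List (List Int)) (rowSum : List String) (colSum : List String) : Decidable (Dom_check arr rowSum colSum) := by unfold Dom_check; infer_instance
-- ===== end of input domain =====

-- B replaces A's second nested per-column rescan with column accumulators filled during the single row pass; same cost, different traversal (objective: alternative).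


-- shared helpers: Python's sum(list) and int(s) (int(s) total via getD; Pre_ guarantees parse success wherever it is reached)
def pySumInt (l : List Int) : Int := l.foldl (· + ·) 0
def parseIntD (s : String) : Int := (PySem.Int.ofStr? s).getD 0

-- ===== PORT A =====
-- inner 'for j in range(len(arr)): s += arr[j][i]'
def colSumA (arr : List (List Int)) (i : Nat) : Int :=
  (List.range arr.length).foldl (fun s j => s + ((arr.getD j []).getD i 0)) 0

-- second loop: 'for i in range(len(arr[0])): … if s != int(colSum[i]): return False'
def colLoopA (arr : List (List Int)) (colSum : List String) (w : Nat) (i : Nat) : Bool :=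
  if _h : i < w then
    if colSumA arr i ≠ parseIntD (colSum.getD i "") then false
    else colLoopA arr colSum w (i + 1)
  else true
termination_by w - i

-- first loop: 'for i in range(len(arr)): if sum(arr[i]) != int(rowSum[i]): return False'
def rowLoopA (arr : List (List Int)) (rowSum : List String) (colSum : List String) (i : Nat) : Bool :=
  if _h : i < arr.length then
    if pySumInt (arr.getD i []) ≠ parseIntD (rowSum.getD i "") then false
    else rowLoopA arr rowSum colSum (i + 1)
  else colLoopA arr colSum (arr.getD 0 []).length 0
termination_by arr.length - i

def check (arr : List (List Int)) (rowSum : List String) (colSum : List String) : Bool :=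
  rowLoopA arr rowSum colSum 0

-- ===== PORT B =====
-- 'for j, v in enumerate(arr[i][:width]): cols[j] += v'
def colsUpdate (cols row : List Int) (w : Nat) : List Int :=
  (PySem.List.enumerate (PySem.List.slice row none (some (w : Int))) 0).foldl
    (fun cs p => cs.set p.1.toNat (cs.getD p.1.toNat 0 + p.2)) cols

-- B's single row pass: early False (none) on a row mismatch, else accumulate columns
def bRowLoop (arr : List (List Int)) (rowSum : List String) (w : Nat) (i : Nat) (cols : List Int) : Option (List Int) :=
  if _h : i < arr.length then
    if pySumInt (arr.getD i []) ≠ parseIntD (rowSum.getD i "") then none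
    else bRowLoop arr rowSum w (i + 1) (colsUpdate cols (arr.getD i []) w)
  else some cols
termination_by arr.length - i

-- B's final pass: 'for i in range(width): if cols[i] != int(colSum[i]): return False'
def bColCheck (colSum : List String) (cols : List Int) (w : Nat) (i : Nat) : Bool :=
  if _h : i < w then
    if cols.getD i 0 ≠ parseIntD (colSum.getD i "") then false
    else bColCheck colSum cols w (i + 1)
  else true
termination_by w - i

def check_alt (arr : List (List Int)) (rowSum : List String) (colSum : List String) : Bool :=
  let w := (arr.getD 0 []).length
  match bRowLoop arr rowSum w 0 (List.replicate w 0) with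
  | none => false
  | some cols => bColCheck colSum cols w 0

-- ===== PRECONDITION & SPEC =====
-- column total as a condition-level definition (same arithmetic A's inner column loop sums)
def pvColTot (arr : List (List Int)) (i : Nat) : Int :=
  (List.range arr.length).foldl (fun s j => s + ((arr.getD j []).getD i 0)) 0

-- Pre_ excludes exactly the inputs on which Python A raises (empty arr reaching arr[0], a missing or
-- unparseable rowSum/colSum entry that A's control flow reaches, or a ragged row indexed in the column
-- phase); every input on which A returns a value satisfies Pre_.
def Pre_check (arr : List (List Int)) (rowSum : List String) (colSum : List String) : Prop :=
  (∃ i < arr.length,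
      (∀ k < i, PySem.Int.ofStr? (rowSum.getD k "") ≠ none ∧
        pySumInt (arr.getD k []) = parseIntD (rowSum.getD k "")) ∧
      PySem.Int.ofStr? (rowSum.getD i "") ≠ none ∧
      pySumInt (arr.getD i []) ≠ parseIntD (rowSum.getD i "")) ∨
  ((∀ i < arr.length, PySem.Int.ofStr? (rowSum.getD i "") ≠ none ∧
       pySumInt (arr.getD i []) = parseIntD (rowSum.getD i "")) ∧
   arr ≠ [] ∧
   ((∃ i < (arr.getD 0 []).length,
       (∀ j < arr.length, i < (arr.getD j []).length) ∧
       (∀ k < i, PySem.Int.ofStr? (colSum.getD k "") ≠ none ∧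
         pvColTot arr k = parseIntD (colSum.getD k "")) ∧
       PySem.Int.ofStr? (colSum.getD i "") ≠ none ∧
       pvColTot arr i ≠ parseIntD (colSum.getD i "")) ∨
    ((∀ j < arr.length, (arr.getD 0 []).length ≤ (arr.getD j []).length) ∧
     (∀ i < (arr.getD 0 []).length, PySem.Int.ofStr? (colSum.getD i "") ≠ none ∧
       pvColTot arr i = parseIntD (colSum.getD i "")))))
instance (arr : List (List Int)) (rowSum : List String) (colSum : List String) : Decidable (Pre_check arr rowSum colSum) := by unfold Pre_check; infer_instance

def pvWitness_check : List (List Int) × List String × List String :=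
  ([[1, 2], [3, 4]], ["3", "7"], ["4", "6"])

def Spec_check (arr : List (List Int)) (rowSum : List String) (colSum : List String) (out : Bool) : Prop := out = check_alt arr rowSum colSum
instance (arr : List (List Int)) (rowSum : List String) (colSum : List String) (out : Bool) : Decidable (Spec_check arr rowSum colSum out) := by unfold Spec_check; infer_instance

-- ===== CLAIM (what is proved, stated in full; the proofs are below) =====
def Claim_equal_check : Prop := ∀ (arr : List (List Int)) (rowSum : List String) (colSum : List String), Dom_check arr rowSum colSum → Pre_check arr rowSum colSum → Spec_check arr rowSum colSum (check arr rowSum colSum)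

-- ===== LEMMAS AND PROOFS =====

theorem enum_foldl_length : ∀ (l : List Int) (s : Int) (cols : List Int),
    ((PySem.List.enumerate l s).foldl
      (fun cs p => cs.set p.1.toNat (cs.getD p.1.toNat 0 + p.2)) cols).length = cols.length
  | [], _, _ => by simp [PySem.List.enumerate_nil]
  | x :: xs, s, cols => by
    rw [PySem.List.enumerate_cons, List.foldl_cons, enum_foldl_length xs]
    simp

theorem enum_foldl_getD : ∀ (l : List Int) (s : Nat) (cols : List Int)
    (_hb : s + l.length ≤ cols.length) (j : Nat),
    ((PySem.List.enumerate l (s : Int)).foldl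
      (fun cs p => cs.set p.1.toNat (cs.getD p.1.toNat 0 + p.2)) cols).getD j 0
      = if s ≤ j ∧ j < s + l.length then cols.getD j 0 + l.getD (j - s) 0 else cols.getD j 0
  | [], s, cols, _, j => by
    rw [PySem.List.enumerate_nil, List.foldl_nil, if_neg (by simp only [List.length_nil]; omega)]
  | x :: xs, s, cols, hb, j => by
    rw [PySem.List.enumerate_cons, List.foldl_cons]
    have hcast : (s : Int) + 1 = ((s + 1 : Nat) : Int) := by push_cast; ring
    rw [hcast, enum_foldl_getD xs (s + 1) _ (by simp only [List.length_cons, List.length_set] at hb ⊢; omega) j]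
    simp only [Int.toNat_natCast, List.length_cons]
    by_cases hj : j = s
    · subst hj
      rw [if_neg (by omega), if_pos (by omega),
        List.getD_eq_getElem?_getD, List.getElem?_set_self (by simp only [List.length_cons] at hb; omega)]
      simp
    · by_cases h1 : s + 1 ≤ j ∧ j < s + 1 + xs.length
      · rw [if_pos h1, if_pos (by omega),
          List.getD_eq_getElem?_getD, List.getElem?_set_ne (by omega),
          ← List.getD_eq_getElem?_getD]
        have hs : j - s = (j - (s + 1)) + 1 := by omega
        rw [hs, List.getD_cons_succ]
      · rw [if_neg h1, if_neg (by omega),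
          List.getD_eq_getElem?_getD, List.getElem?_set_ne (by omega),
          ← List.getD_eq_getElem?_getD]

theorem colsUpdate_length (cols row : List Int) (w : Nat) :
    (colsUpdate cols row w).length = cols.length :=
  enum_foldl_length _ _ cols

theorem colsUpdate_getD (cols row : List Int) (w j : Nat) (hw : cols.length = w) (hj : j < w) :
    (colsUpdate cols row w).getD j 0 = cols.getD j 0 + row.getD j 0 := by
  unfold colsUpdate
  rw [PySem.List.slice_to_natCast]
  have h := enum_foldl_getD (row.take w) 0 cols (by simp only [List.length_take]; omega) j
  simp only [Nat.cast_zero, Nat.zero_add, Nat.sub_zero, Nat.zero_le, true_and,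
    List.length_take] at h
  rw [h]
  by_cases h1 : j < min w row.length
  · rw [if_pos h1]
    congr 1
    rw [List.getD_eq_getElem?_getD, List.getElem?_take_of_lt (by omega),
      ← List.getD_eq_getElem?_getD]
  · rw [if_neg h1]
    have hr : row.length ≤ j := by omega
    rw [List.getD_eq_default _ _ hr, add_zero]

-- partial column sum over the first i rows
def colPartial (arr : List (List Int)) (i j : Nat) : Int :=
  (List.range i).foldl (fun s k => s + ((arr.getD k []).getD j 0)) 0

theorem colPartial_succ (arr : List (List Int)) (i j : Nat) :
    colPartial arr (i + 1) j = colPartial arr i j + (arr.getD i []).getD j 0 := by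
  unfold colPartial
  rw [List.range_succ, List.foldl_append]
  rfl

theorem colPartial_stable (arr : List (List Int)) (i j : Nat) (hi : arr.length ≤ i) :
    colPartial arr i j = colSumA arr j := by
  induction i with
  | zero =>
    have harr : arr = [] := List.eq_nil_of_length_eq_zero (by omega)
    subst harr; rfl
  | succ n ih =>
    by_cases h : arr.length ≤ n
    · have hget : arr.getD n [] = [] := List.getD_eq_default _ _ h
      rw [colPartial_succ, hget, ih h]
      simp
    · have : arr.length = n + 1 := by omega
      rw [← this]; rfl

-- if cols holds the full column sums, A's column loop and B's final pass agree
theorem colLoop_eq_bColCheck (arr : List (List Int)) (colSum : List String) (cols : List Int)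
    (w : Nat) (i : Nat) (hc : ∀ j < w, cols.getD j 0 = colSumA arr j) :
    colLoopA arr colSum w i = bColCheck colSum cols w i := by
  unfold colLoopA bColCheck
  by_cases h : i < w
  · rw [dif_pos h, dif_pos h, hc i h]
    by_cases hm : colSumA arr i ≠ parseIntD (colSum.getD i "")
    · rw [if_pos hm, if_pos hm]
    · rw [if_neg hm, if_neg hm]
      exact colLoop_eq_bColCheck arr colSum cols w (i + 1) hc
  · rw [dif_neg h, dif_neg h]
termination_by w - i

-- main loop correspondence: B's accumulator equals A's partial column sums
theorem rowLoop_eq (arr : List (List Int)) (rowSum colSum : List String) (w : Nat)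
    (hw : w = (arr.getD 0 []).length) (i : Nat) (cols : List Int)
    (hlen : cols.length = w) (hc : ∀ j < w, cols.getD j 0 = colPartial arr i j) :
    rowLoopA arr rowSum colSum i =
      (match bRowLoop arr rowSum w i cols with
       | none => false
       | some cols' => bColCheck colSum cols' w 0) := by
  unfold rowLoopA bRowLoop
  by_cases h : i < arr.length
  · rw [dif_pos h, dif_pos h]
    by_cases hm : pySumInt (arr.getD i []) ≠ parseIntD (rowSum.getD i "")
    · rw [if_pos hm, if_pos hm]
    · rw [if_neg hm, if_neg hm]
      exact rowLoop_eq arr rowSum colSum w hw (i + 1) (colsUpdate cols (arr.getD i []) w)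
        (by rw [colsUpdate_length]; exact hlen)
        (fun j hj => by
          rw [colsUpdate_getD cols (arr.getD i []) w j hlen hj, hc j hj, colPartial_succ])
  · rw [dif_neg h, dif_neg h]
    have hfull : ∀ j < w, cols.getD j 0 = colSumA arr j := fun j hj => by
      rw [hc j hj]
      exact colPartial_stable arr i j (by omega)
    rw [← hw]
    exact colLoop_eq_bColCheck arr colSum cols w 0 hfull
termination_by arr.length - i

-- ===== VERDICT (by name: the statement is the Claim_ definition above) =====
theorem check_spec : Claim_equal_check := by
  intro arr rowSum colSum _hdom _hpre
  unfold Spec_check check check_alt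
  exact rowLoop_eq arr rowSum colSum _ rfl 0 (List.replicate _ 0) (by simp)
    (fun j hj => by simp [colPartial])
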